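-- pv_equiv track=rewrite | github.com/joshvocal/Advent-of-Code-Solutions | 2015/day_03/solve.py | part2
-- ===== SOURCE A (Python) =====
-- def part2(line):
--     santa_houses = set()
--     robot_houses = set()
--
--     s_x = 0
--     s_y = 0
--     r_x = 0
--     r_y = 0
--
--     santa_houses.add((0, 0))
--     robot_houses.add((0, 0))
--
--     for index, char in enumerate(line):
--         if index % 2 == 0:
--             if char == '^':
--                 s_y += 1
--             elif char == 'v':
--                 s_y -= 1
--             elif char == '>':
--                 s_x += 1
--             elif char == '<':
--                 s_x -= 1
--
--             santa_houses.add((s_x, s_y))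
--         else:
--             if char == '^':
--                 r_y += 1
--             elif char == 'v':
--                 r_y -= 1
--             elif char == '>':
--                 r_x += 1
--             elif char == '<':
--                 r_x -= 1
--
--             robot_houses.add((r_x, r_y))
--
--     return len(robot_houses.union(santa_houses))
-- ===== SOURCE B (Python) =====
-- DELTA = {'^': (0, 1), 'v': (0, -1), '>': (1, 0), '<': (-1, 0)}
--
--
-- def part2(line):
--     # Swap-the-movers walk: `me` moves this step, then trades places with `other`.
--     me = (0, 0)
--     other = (0, 0)
--     trail = [(0, 0)]
--     for ch in line:
--         dx, dy = DELTA.get(ch, (0, 0))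
--         me = (me[0] + dx, me[1] + dy)
--         trail.append(me)
--         me, other = other, me
--     # Count distinct houses by sorting and scanning adjacent pairs (no sets).
--     trail.sort()
--     return sum(p != q for p, q in zip(trail, trail[1:])) + 1
-- ===== Notes on version B (the rewrite author's own statement) =====
-- stated objective: alternative
-- what changed: Replaces A's parity-branched pass maintaining two incremental hash sets and taking their union's size by a swap-the-movers walk (the active mover moves, records its position in one trail list, then trades places with the other) followed by sorting the trail and counting adjacent-distinct pairs, so no sets and no parity test remain.
import Mathlib
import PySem

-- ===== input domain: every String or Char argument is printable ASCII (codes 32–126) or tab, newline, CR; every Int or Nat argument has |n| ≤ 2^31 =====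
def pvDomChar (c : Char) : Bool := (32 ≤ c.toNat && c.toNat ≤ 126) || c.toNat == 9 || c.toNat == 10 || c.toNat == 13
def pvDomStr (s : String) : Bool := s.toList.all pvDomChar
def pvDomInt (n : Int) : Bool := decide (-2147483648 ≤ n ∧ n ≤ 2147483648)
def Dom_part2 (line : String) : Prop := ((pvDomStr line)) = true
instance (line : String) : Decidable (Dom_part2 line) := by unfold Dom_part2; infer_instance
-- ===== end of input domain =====

-- B replaces A's parity-branched pass maintaining two hash sets by a swap-the-movers walk
-- that records every visited position in one list, then sorts it and counts
-- adjacent-distinct pairs (objective: alternative — sort-scan counting instead of sets).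

-- ===== PORT A =====
-- loop body of A's single enumerated pass (state: s_x, s_y, r_x, r_y, santa_houses, robot_houses)
def aStep (st : Int × Int × Int × Int × PySem.Set (Int × Int) × PySem.Set (Int × Int))
    (ic : Int × Char) : Int × Int × Int × Int × PySem.Set (Int × Int) × PySem.Set (Int × Int) :=
  let (s_x, s_y, r_x, r_y, santa, robot) := st
  if ic.1 % 2 == 0 then
    let p : Int × Int :=
      if ic.2 = '^' then (s_x, s_y + 1)
      else if ic.2 = 'v' then (s_x, s_y - 1)
      else if ic.2 = '>' then (s_x + 1, s_y)
      else if ic.2 = '<' then (s_x - 1, s_y)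
      else (s_x, s_y)
    (p.1, p.2, r_x, r_y, PySem.Set.add santa p, robot)
  else
    let p : Int × Int :=
      if ic.2 = '^' then (r_x, r_y + 1)
      else if ic.2 = 'v' then (r_x, r_y - 1)
      else if ic.2 = '>' then (r_x + 1, r_y)
      else if ic.2 = '<' then (r_x - 1, r_y)
      else (r_x, r_y)
    (s_x, s_y, p.1, p.2, santa, PySem.Set.add robot p)

def part2 (line : String) : Int :=
  let st := (PySem.List.enumerate line.toList 0).foldl aStep
    ((0 : Int), (0 : Int), (0 : Int), (0 : Int),
     PySem.Set.add PySem.Set.empty ((0 : Int), (0 : Int)),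
     PySem.Set.add PySem.Set.empty ((0 : Int), (0 : Int)))
  -- len(robot_houses.union(santa_houses))
  PySem.Set.len (PySem.Set.union st.2.2.2.2.2 st.2.2.2.2.1)

-- ===== PORT B =====
def pvDELTA : PySem.Dict Char (Int × Int) :=
  ((((PySem.Dict.empty).insert '^' ((0 : Int), (1 : Int))).insert 'v'
      ((0 : Int), (-1 : Int))).insert '>' ((1 : Int), (0 : Int))).insert '<' ((-1 : Int), (0 : Int))

-- loop body of B's walk: `me` moves and is appended to the trail, then swaps with `other`
def bStep (st : (Int × Int) × (Int × Int) × List (Int × Int)) (ch : Char) :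
    (Int × Int) × (Int × Int) × List (Int × Int) :=
  let d := PySem.Dict.getD pvDELTA ch ((0 : Int), (0 : Int))
  let me : Int × Int := (st.1.1 + d.1, st.1.2 + d.2)
  (st.2.1, me, st.2.2 ++ [me])

def part2_alt (line : String) : Int :=
  let st := line.toList.foldl bStep
    (((0 : Int), (0 : Int)), ((0 : Int), (0 : Int)), [((0 : Int), (0 : Int))])
  -- trail.sort()  (Python tuple sort = lexicographic on the two components)
  let l := PySem.List.sorted2 st.2.2 Prod.fst Prod.snd
  -- sum(p != q for p, q in zip(trail, trail[1:])) + 1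
  ((l.zip (PySem.List.slice l (some 1) none)).map
      (fun p => if p.1 ≠ p.2 then (1 : Int) else 0)).sum + 1

-- ===== PRECONDITION & SPEC =====
def Spec_part2 (line : String) (out : Int) : Prop := out = part2_alt line
instance (line : String) (out : Int) : Decidable (Spec_part2 line out) := by unfold Spec_part2; infer_instance

-- ===== CLAIM (what is proved, stated in full; the proofs are below) =====
def Claim_equal_part2 : Prop := ∀ (line : String), Dom_part2 line → Spec_part2 line (part2 line)

-- ===== LEMMAS AND PROOFS =====

-- the move a single arrow character causes, in B's dict form
def mv (p : Int × Int) (c : Char) : Int × Int :=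
  let d := PySem.Dict.getD pvDELTA c ((0 : Int), (0 : Int))
  (p.1 + d.1, p.2 + d.2)

theorem bStep_eq (st : (Int × Int) × (Int × Int) × List (Int × Int)) (c : Char) :
    bStep st c = (st.2.1, mv st.1 c, st.2.2 ++ [mv st.1 c]) := rfl

-- an even-index step of A's loop moves santa by mv and records the new position
theorem aStep_even (c : Char) (i sx sy rx ry : Int) (sh rh : PySem.Set (Int × Int))
    (h : i % 2 = 0) :
    aStep (sx, sy, rx, ry, sh, rh) (i, c) =
      ((mv (sx, sy) c).1, (mv (sx, sy) c).2, rx, ry,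
        PySem.Set.add sh (mv (sx, sy) c), rh) := by
  by_cases h1 : c = '^' <;> by_cases h2 : c = 'v' <;> by_cases h3 : c = '>' <;>
    by_cases h4 : c = '<' <;>
  simp_all [aStep, mv, pvDELTA, PySem.Dict.getD_insert, PySem.Dict.getD_empty, sub_eq_add_neg]

theorem aStep_odd (c : Char) (i sx sy rx ry : Int) (sh rh : PySem.Set (Int × Int))
    (h : i % 2 = 1) :
    aStep (sx, sy, rx, ry, sh, rh) (i, c) =
      (sx, sy, (mv (rx, ry) c).1, (mv (rx, ry) c).2, sh,
        PySem.Set.add rh (mv (rx, ry) c)) := by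
  by_cases h1 : c = '^' <;> by_cases h2 : c = 'v' <;> by_cases h3 : c = '>' <;>
    by_cases h4 : c = '<' <;>
  simp_all [aStep, mv, pvDELTA, PySem.Dict.getD_insert, PySem.Dict.getD_empty, sub_eq_add_neg]

-- membership invariant: A's two sets together hold exactly B's trail, from either parity
theorem interleave_mem (cs : List Char) :
    (∀ (m : Nat) (sp rp : Int × Int) (sh rh : PySem.Set (Int × Int)) (tr : List (Int × Int)),
      (∀ x : Int × Int, (x ∈ sh ∨ x ∈ rh) ↔ x ∈ tr) →
      ∀ x : Int × Int,
        (x ∈ ((PySem.List.enumerate cs (2 * (m : Int))).foldl aStep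
            (sp.1, sp.2, rp.1, rp.2, sh, rh)).2.2.2.2.1 ∨
         x ∈ ((PySem.List.enumerate cs (2 * (m : Int))).foldl aStep
            (sp.1, sp.2, rp.1, rp.2, sh, rh)).2.2.2.2.2) ↔
        x ∈ (cs.foldl bStep (sp, rp, tr)).2.2) ∧
    (∀ (m : Nat) (sp rp : Int × Int) (sh rh : PySem.Set (Int × Int)) (tr : List (Int × Int)),
      (∀ x : Int × Int, (x ∈ sh ∨ x ∈ rh) ↔ x ∈ tr) →
      ∀ x : Int × Int,
        (x ∈ ((PySem.List.enumerate cs (2 * (m : Int) + 1)).foldl aStep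
            (sp.1, sp.2, rp.1, rp.2, sh, rh)).2.2.2.2.1 ∨
         x ∈ ((PySem.List.enumerate cs (2 * (m : Int) + 1)).foldl aStep
            (sp.1, sp.2, rp.1, rp.2, sh, rh)).2.2.2.2.2) ↔
        x ∈ (cs.foldl bStep (rp, sp, tr)).2.2) := by
  induction cs with
  | nil => simp [PySem.List.enumerate]
  | cons c rest ih =>
    constructor
    · intro m sp rp sh rh tr hinv x
      rw [PySem.List.enumerate_cons, List.foldl_cons,
        aStep_even c _ sp.1 sp.2 rp.1 rp.2 sh rh (Int.mul_emod_right 2 _),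
        List.foldl_cons, bStep_eq]
      exact ih.2 m (mv sp c) rp (PySem.Set.add sh (mv sp c)) rh (tr ++ [mv sp c])
        (by intro y; simp [PySem.Set.mem_add, ← hinv y]; tauto) x
    · intro m sp rp sh rh tr hinv x
      rw [PySem.List.enumerate_cons, List.foldl_cons,
        aStep_odd c _ sp.1 sp.2 rp.1 rp.2 sh rh (by omega),
        show (2 * (m : Int) + 1) + 1 = 2 * ((m + 1 : Nat) : Int) by push_cast; ring,
        List.foldl_cons, bStep_eq]
      exact ih.1 (m + 1) sp (mv rp c) sh (PySem.Set.add rh (mv rp c)) (tr ++ [mv rp c])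
        (by intro y; simp [PySem.Set.mem_add, ← hinv y]; tauto) x

-- A's robot set stays duplicate-free through the fold
theorem afold_nodup (l : List (Int × Char))
    (st : Int × Int × Int × Int × PySem.Set (Int × Int) × PySem.Set (Int × Int))
    (h : List.Nodup st.2.2.2.2.2) : List.Nodup ((l.foldl aStep st).2.2.2.2.2) := by
  induction l generalizing st with
  | nil => exact h
  | cons ic rest ih =>
    obtain ⟨sx, sy, rx, ry, sh, rh⟩ := st
    apply ih
    simp only [aStep]
    split_ifs <;> simp_all [PySem.Set.nodup_add _ _ h]

-- B's trail stays nonempty through the fold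
theorem bfold_ne_nil (cs : List Char) (st : (Int × Int) × (Int × Int) × List (Int × Int))
    (h : st.2.2 ≠ []) : (cs.foldl bStep st).2.2 ≠ [] := by
  induction cs generalizing st with
  | nil => exact h
  | cons c rest ih => exact ih _ (by simp [bStep_eq])

-- Python's lexicographic ≤ on pairs
def lexle (p q : Int × Int) : Prop := p.1 < q.1 ∨ (p.1 = q.1 ∧ p.2 ≤ q.2)

-- the comparator sorted2 uses for keys (fst, snd)
def blt (p q : Int × Int) : Bool :=
  decide (p.1 < q.1) || (!decide (q.1 < p.1) && decide (p.2 < q.2))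

theorem insertBy_pairwise (x : Int × Int) (ys : List (Int × Int))
    (h : ys.Pairwise lexle) : (PySem.List.insertBy blt x ys).Pairwise lexle := by
  induction ys with
  | nil => simp [PySem.List.insertBy]
  | cons y ys ih =>
    rcases h with _ | ⟨hy, hys⟩
    by_cases hb : blt x y = true
    · have hlt : x.1 < y.1 ∨ (x.1 = y.1 ∧ x.2 < y.2) := by
        simp [blt] at hb; omega
      rw [show PySem.List.insertBy blt x (y :: ys) = x :: y :: ys by
        simp [PySem.List.insertBy, hb]]
      refine List.Pairwise.cons ?_ (List.Pairwise.cons hy hys)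
      intro z hz
      cases hz with
      | head => unfold lexle; omega
      | tail _ hz => have := hy z hz; unfold lexle at *; omega
    · have hle : lexle y x := by
        simp [blt] at hb; unfold lexle; omega
      rw [show PySem.List.insertBy blt x (y :: ys) = y :: PySem.List.insertBy blt x ys by
        simp [PySem.List.insertBy, hb]]
      refine List.Pairwise.cons ?_ (ih hys)
      intro z hz
      rcases (PySem.List.mem_insertBy blt x z ys).mp hz with rfl | hz
      · exact hle
      · exact hy z hz

theorem foldl_insertBy_pairwise (xs : List (Int × Int)) (acc : List (Int × Int))
    (h : acc.Pairwise lexle) :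
    (xs.foldl (fun acc x => PySem.List.insertBy blt x acc) acc).Pairwise lexle := by
  induction xs generalizing acc with
  | nil => exact h
  | cons x xs ih => exact ih _ (insertBy_pairwise x acc h)

theorem sorted2_pairwise_lexle (xs : List (Int × Int)) :
    (PySem.List.sorted2 xs Prod.fst Prod.snd).Pairwise lexle :=
  foldl_insertBy_pairwise xs [] List.Pairwise.nil

-- counting adjacent-distinct pairs in a lex-sorted nonempty list gives its distinct count
theorem adj_count (l : List (Int × Int)) (h : l.Pairwise lexle) (hne : l ≠ []) :
    ((l.zip l.tail).map (fun p => if p.1 ≠ p.2 then (1 : Int) else 0)).sum + 1 =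
      (l.toFinset.card : Int) := by
  induction l with
  | nil => exact absurd rfl hne
  | cons a t ih =>
    rcases h with _ | ⟨ha, ht⟩
    cases t with
    | nil => simp
    | cons b t' =>
      have hrec := ih ht (by simp)
      by_cases hab : a = b
      · subst hab
        simpa [List.zip, List.toFinset_cons] using hrec
      · have hnotmem : a ∉ (b :: t').toFinset := by
          simp only [List.mem_toFinset]
          intro hm
          rcases List.mem_cons.mp hm with h' | hm
          · exact hab h'
          · have h1 := ha a (by simp [hm])
            have h2 := ha b (by simp)
            rcases ht with _ | ⟨hb, _⟩
            have h3 := hb a hm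
            unfold lexle at *
            exact hab (by ext <;> omega)
        rw [List.toFinset_cons, Finset.card_insert_of_notMem hnotmem]
        simp only [List.zip, List.tail_cons] at hrec ⊢
        push_cast
        simp only [List.zipWith_cons_cons, List.map_cons, List.sum_cons, if_pos hab]
        omega

-- a duplicate-free list with the same members as tr has tr's distinct count as length
theorem nodup_len_eq_card (u tr : List (Int × Int)) (hu : u.Nodup)
    (hm : ∀ x, x ∈ u ↔ x ∈ tr) : (u.length : Int) = (tr.toFinset.card : Int) := by
  have : u.toFinset = tr.toFinset := by
    apply Finset.ext; intro x; simp [List.mem_toFinset, hm x]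
  rw [← this, List.toFinset_card_of_nodup hu]

-- ===== VERDICT (by name: the statement is the Claim_ definition above) =====
theorem part2_spec : Claim_equal_part2 := by
  intro line _
  unfold Spec_part2 part2 part2_alt
  set tr := (line.toList.foldl bStep
    (((0 : Int), (0 : Int)), ((0 : Int), (0 : Int)), [((0 : Int), (0 : Int))])).2.2 with htr
  set A := (PySem.List.enumerate line.toList 0).foldl aStep
    ((0 : Int), (0 : Int), (0 : Int), (0 : Int),
     PySem.Set.add PySem.Set.empty ((0 : Int), (0 : Int)),
     PySem.Set.add PySem.Set.empty ((0 : Int), (0 : Int))) with hA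
  -- A's side equals the distinct count of B's trail
  have hmem : ∀ x : Int × Int, (x ∈ A.2.2.2.2.1 ∨ x ∈ A.2.2.2.2.2) ↔ x ∈ tr := by
    have h := (interleave_mem line.toList).1 0 ((0 : Int), (0 : Int)) ((0 : Int), (0 : Int))
      (PySem.Set.add PySem.Set.empty ((0 : Int), (0 : Int)))
      (PySem.Set.add PySem.Set.empty ((0 : Int), (0 : Int)))
      [((0 : Int), (0 : Int))]
      (by intro y; simp [PySem.Set.add, PySem.Set.empty, PySem.Set.contains])
    simpa using h
  have hrnodup : A.2.2.2.2.2.Nodup := by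
    rw [hA]
    exact afold_nodup _ _ (PySem.Set.nodup_add _ _ List.nodup_nil)
  have hunion_nodup : (PySem.Set.union A.2.2.2.2.2 A.2.2.2.2.1).Nodup :=
    PySem.Set.nodup_union _ _ hrnodup
  have humem : ∀ x : Int × Int, x ∈ PySem.Set.union A.2.2.2.2.2 A.2.2.2.2.1 ↔ x ∈ tr := by
    intro x
    rw [PySem.Set.mem_union, or_comm]
    exact hmem x
  have hA_eq : PySem.Set.len (PySem.Set.union A.2.2.2.2.2 A.2.2.2.2.1) =
      (tr.toFinset.card : Int) := by
    rw [PySem.Set.len]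
    exact nodup_len_eq_card _ _ hunion_nodup humem
  -- B's side equals the same distinct count
  set l := PySem.List.sorted2 tr Prod.fst Prod.snd with hl
  have hperm : l.Perm tr := PySem.List.sorted2_perm tr Prod.fst Prod.snd false
  have htrne : tr ≠ [] :=
    bfold_ne_nil line.toList
      (((0 : Int), (0 : Int)), ((0 : Int), (0 : Int)), [((0 : Int), (0 : Int))]) (by simp)
  have hlne : l ≠ [] := by
    intro h0
    apply htrne
    have hlen : tr.length = 0 := by rw [← hperm.length_eq, h0]; rfl
    exact List.length_eq_zero_iff.mp hlen
  have hB_eq : ((l.zip (PySem.List.slice l (some 1) none)).map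
      (fun p => if p.1 ≠ p.2 then (1 : Int) else 0)).sum + 1 = (tr.toFinset.card : Int) := by
    rw [PySem.List.slice_from_one, ← List.toFinset_eq_of_perm _ _ hperm]
    exact adj_count l (sorted2_pairwise_lexle tr) hlne
  rw [hA_eq, ← hB_eq]
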